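-- pv_equiv track=rewrite | github.com/Oluaaa/- | 4/6.py | drop_one_and_five
-- ===== SOURCE A (Python) =====
-- def drop_one_and_five(n):
--     count = 0
--     n1 = 0
--     nuit = 1
--     while n > 0:
--         n1 = n % 10
--         n = n // 10
--
--         if n1 != 1 and n1 != 5:
--             count += n1 * nuit
--             nuit *= 10
--     return count
-- ===== SOURCE B (Python) =====
-- def drop_one_and_five(n):
--     # Recursive, most-significant-digit-first rebuild: no place-value multiplier needed.
--     if n <= 0:
--         return 0
--     d = n % 10
--     rest = drop_one_and_five(n // 10)
--     return rest if d in (1, 5) else rest * 10 + d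
-- ===== Notes on version B (the rewrite author's own statement) =====
-- stated objective: simpler
-- what changed: Replaced the LSB-first while loop that tracks a running sum and a place-value multiplier (count, nuit) with a direct recursion that rebuilds the kept digits most-significant-first (ten times the rest plus the digit), eliminating both accumulators.
import Mathlib
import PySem

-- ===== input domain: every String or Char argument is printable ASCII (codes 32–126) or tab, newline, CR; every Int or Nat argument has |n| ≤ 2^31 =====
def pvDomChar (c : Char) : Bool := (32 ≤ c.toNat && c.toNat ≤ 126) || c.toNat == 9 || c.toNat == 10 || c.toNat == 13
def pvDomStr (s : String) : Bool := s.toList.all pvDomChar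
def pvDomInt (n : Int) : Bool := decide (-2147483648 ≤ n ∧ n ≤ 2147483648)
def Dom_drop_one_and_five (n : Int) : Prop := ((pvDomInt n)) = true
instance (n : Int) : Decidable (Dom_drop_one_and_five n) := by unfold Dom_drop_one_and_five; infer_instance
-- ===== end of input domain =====

-- B replaces A's LSB-first sum-and-multiplier loop with a direct MSB-first recursion (ten times the rest plus the kept digit); same cost, simpler.

-- termination helper for both recursions: n // 10 shrinks for n > 0
theorem pv_fdiv_ten_lt (n : Int) (h : 0 < n) : (PySem.Int.floordiv n 10).toNat < n.toNat := by
  simp only [PySem.Int.floordiv]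
  rw [Int.fdiv_eq_ediv, if_pos (Or.inl (by norm_num : (0:Int) ≤ 10))]
  omega

-- ===== PORT A =====
-- the while loop, with its three state variables count, n1 (via let), nuit
def pvLoopA (n count nuit : Int) : Int :=
  if h : n > 0 then
    let n1 := PySem.Int.mod n 10
    let n' := PySem.Int.floordiv n 10
    if n1 ≠ 1 ∧ n1 ≠ 5 then
      pvLoopA n' (count + n1 * nuit) (nuit * 10)
    else
      pvLoopA n' count nuit
  else count
termination_by n.toNat
decreasing_by all_goals exact pv_fdiv_ten_lt n h

def drop_one_and_five (n : Int) : Int := pvLoopA n 0 1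

-- ===== PORT B =====
def drop_one_and_five_alt (n : Int) : Int :=
  if h : n ≤ 0 then 0
  else
    let d := PySem.Int.mod n 10
    let rest := drop_one_and_five_alt (PySem.Int.floordiv n 10)
    if d = 1 ∨ d = 5 then rest else rest * 10 + d
termination_by n.toNat
decreasing_by exact pv_fdiv_ten_lt n (by omega)

-- ===== PRECONDITION & SPEC =====
def Spec_drop_one_and_five (n : Int) (out : Int) : Prop := out = drop_one_and_five_alt n
instance (n : Int) (out : Int) : Decidable (Spec_drop_one_and_five n out) := by unfold Spec_drop_one_and_five; infer_instance

-- ===== CLAIM (what is proved, stated in full; the proofs are below) =====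
def Claim_equal_drop_one_and_five : Prop := ∀ (n : Int), Dom_drop_one_and_five n → Spec_drop_one_and_five n (drop_one_and_five n)

-- ===== LEMMAS AND PROOFS =====

-- the loop invariant: A's loop computes count + nuit * (B's value)
theorem pvLoopA_invariant (k : Nat) : ∀ (n count nuit : Int), n.toNat ≤ k →
    pvLoopA n count nuit = count + nuit * drop_one_and_five_alt n := by
  induction k with
  | zero =>
    intro n count nuit hn
    rw [pvLoopA, drop_one_and_five_alt]
    have : ¬ n > 0 := by omega
    simp [this, show n ≤ 0 from by omega]
  | succ k ih =>
    intro n count nuit hn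
    rw [pvLoopA, drop_one_and_five_alt]
    by_cases hpos : n > 0
    · have hlt : (PySem.Int.floordiv n 10).toNat ≤ k := by
        have := pv_fdiv_ten_lt n hpos
        omega
      simp only [hpos, dif_pos, show ¬ n ≤ 0 from by omega, dif_neg, not_false_iff]
      by_cases hkeep : PySem.Int.mod n 10 ≠ 1 ∧ PySem.Int.mod n 10 ≠ 5
      · have hkeep' : ¬ (PySem.Int.mod n 10 = 1 ∨ PySem.Int.mod n 10 = 5) := by tauto
        rw [if_pos hkeep, if_neg hkeep', ih _ _ _ hlt]
        ring
      · have hkeep' : PySem.Int.mod n 10 = 1 ∨ PySem.Int.mod n 10 = 5 := by tauto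
        rw [if_neg hkeep, if_pos hkeep', ih _ _ _ hlt]
    · simp [hpos, show n ≤ 0 from by omega]

-- ===== VERDICT (by name: the statement is the Claim_ definition above) =====
theorem drop_one_and_five_spec : Claim_equal_drop_one_and_five := by
  intro n _
  unfold Spec_drop_one_and_five drop_one_and_five
  rw [pvLoopA_invariant n.toNat n 0 1 (le_refl _)]
  ring
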